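-- pv_equiv track=rewrite | github.com/ypypy28/yandex.contest | 2022_backend_school_summer/E. ideal/solution.py | make_seq
-- ===== SOURCE A (Python) =====
-- def make_seq(br: dict[str, list[int]], ignore: int) -> list[str]:
--     seq = []
--     i = j = 0
--     while i < len(br['(']) and j < len(br[')']):
--         if ignore == br['('][i]:
--             i += 1
--             continue
--         elif ignore == br[')'][j]:
--             j += 1
--             continue
--         elif br['('][i] < br[')'][j]:
--             seq.append('(')
--             i += 1
--         else:
--             seq.append(')')
--             j += 1
--
--     while i < len(br['(']):
--         if ignore != br['('][i]:
--             seq.append('(')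
--         i += 1
--
--     while j < len(br[')']):
--         if ignore != br[')'][j]:
--             seq.append(')')
--         j += 1
--
--     return seq
-- ===== SOURCE B (Python) =====
-- def make_seq(br: dict[str, list[int]], ignore: int) -> list[str]:
--     seq = []
--     rest = [p for p in br[')'] if p != ignore]
--     for x in br['(']:
--         if x == ignore:
--             continue
--         while rest and rest[0] <= x:
--             seq.append(')')
--             rest = rest[1:]
--         seq.append('(')
--     return seq + [')'] * len(rest)
-- ===== Notes on version B (the rewrite author's own statement) =====
-- stated objective: alternative
-- what changed: Replaces A's symmetric three-loop two-pointer merge by a single driver pass over the '(' list that flushes the pending ')' positions (dualized comparison y <= x) before emitting each open bracket and appends the leftover closes by length at the end.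
import Mathlib
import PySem

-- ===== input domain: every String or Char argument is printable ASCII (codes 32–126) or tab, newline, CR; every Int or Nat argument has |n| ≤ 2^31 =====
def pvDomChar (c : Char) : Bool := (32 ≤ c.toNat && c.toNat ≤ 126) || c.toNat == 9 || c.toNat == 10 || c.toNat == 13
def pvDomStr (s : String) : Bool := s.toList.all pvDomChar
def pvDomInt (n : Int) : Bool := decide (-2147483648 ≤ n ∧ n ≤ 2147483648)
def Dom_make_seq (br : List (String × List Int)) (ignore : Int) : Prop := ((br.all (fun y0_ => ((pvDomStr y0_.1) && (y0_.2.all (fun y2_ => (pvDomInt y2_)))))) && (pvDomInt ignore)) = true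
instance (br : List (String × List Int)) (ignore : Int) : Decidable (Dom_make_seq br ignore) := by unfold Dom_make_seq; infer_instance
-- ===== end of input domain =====

-- ===== PORT A =====

-- B restructures A's symmetric two-pointer merge (three while loops over i and j) into a single
-- driver pass over the '(' list that flushes the pending ')' positions before each open bracket,
-- then appends the leftover closes; objective: alternative (same cost, different decomposition).

-- ===== PORT A =====
-- the trailing `while i < len(br['('])` loop: append '(' for each remaining entry ≠ ignore
def pvTailOpen (ignore : Int) : List Int → List String
  | [] => []
  | x :: xs => if ignore ≠ x then "(" :: pvTailOpen ignore xs else pvTailOpen ignore xs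

-- the trailing `while j < len(br[')'])` loop
def pvTailClose (ignore : Int) : List Int → List String
  | [] => []
  | y :: ys => if ignore ≠ y then ")" :: pvTailClose ignore ys else pvTailClose ignore ys

-- the main `while i < … and j < …` two-pointer loop, then the two tail loops
def pvMergeA (ignore : Int) : List Int → List Int → List String
  | [], ys => pvTailClose ignore ys
  | x :: xs, [] => pvTailOpen ignore (x :: xs)
  | x :: xs, y :: ys =>
      if ignore = x then pvMergeA ignore xs (y :: ys)
      else if ignore = y then pvMergeA ignore (x :: xs) ys
      else if x < y then "(" :: pvMergeA ignore xs (y :: ys)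
      else ")" :: pvMergeA ignore (x :: xs) ys
  termination_by xs ys => xs.length + ys.length
  decreasing_by all_goals (simp; try omega)

def make_seq (br : List (String × List Int)) (ignore : Int) : List String :=
  -- br['('] / br[')'] — Pre_make_seq guarantees both keys are present (else Python raises KeyError)
  pvMergeA ignore ((PySem.Dict.get? ⟨br⟩ "(").getD []) ((PySem.Dict.get? ⟨br⟩ ")").getD [])

-- ===== PORT B =====
-- the inner `while rest and rest[0] <= x` loop: returns (rest after the flush, the emitted ')'s)
def pvFlushB (x : Int) : List Int → List Int × List String
  | [] => ([], [])
  | y :: ys =>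
      if y ≤ x then
        let r := pvFlushB x ys
        (r.1, ")" :: r.2)
      else (y :: ys, [])

-- the `for x in br['(']` driver loop, state = (rest, seq)
def pvDriveB (ignore : Int) (st : List Int × List String) (x : Int) : List Int × List String :=
  if x = ignore then st
  else
    let r := pvFlushB x st.1
    (r.1, st.2 ++ r.2 ++ ["("])

def make_seq_alt (br : List (String × List Int)) (ignore : Int) : List String :=
  -- rest = [p for p in br[')'] if p != ignore]
  let st := (((PySem.Dict.get? ⟨br⟩ ")").getD []).filter (fun p => p ≠ ignore), ([] : List String))
  -- the driver loop, then `seq + [')'] * len(rest)`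
  let fin := (((PySem.Dict.get? ⟨br⟩ "(").getD [])).foldl (pvDriveB ignore) st
  fin.2 ++ List.replicate fin.1.length ")"

-- ===== PRECONDITION & SPEC =====
-- Pre_ excludes only dicts missing the '(' or ')' key, on which Python A raises KeyError
-- (as does B); A returns on every other input and B matches it there.
def Pre_make_seq (br : List (String × List Int)) (ignore : Int) : Prop :=
  (PySem.Dict.get? ⟨br⟩ "(").isSome ∧ (PySem.Dict.get? ⟨br⟩ ")").isSome
instance (br : List (String × List Int)) (ignore : Int) : Decidable (Pre_make_seq br ignore) := by
  unfold Pre_make_seq; infer_instance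

def pvWitness_make_seq : (List (String × List Int)) × Int :=
  ([("(", [0, 2, 5]), (")", [6, 2, 1])], 5)

def Spec_make_seq (br : List (String × List Int)) (ignore : Int) (out : List String) : Prop := out = make_seq_alt br ignore
instance (br : List (String × List Int)) (ignore : Int) (out : List String) : Decidable (Spec_make_seq br ignore out) := by unfold Spec_make_seq; infer_instance

-- ===== CLAIM (what is proved, stated in full; the proofs are below) =====
def Claim_equal_make_seq : Prop := ∀ (br : List (String × List Int)) (ignore : Int), Dom_make_seq br ignore → Pre_make_seq br ignore → Spec_make_seq br ignore (make_seq br ignore)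

-- ===== LEMMAS AND PROOFS =====

-- canonical form of A's merge: merge of the two ignore-filtered lists into tagged
-- events — positions from the '(' list tagged 1, from the ')' list tagged 0
def pvMrg : List Int → List Int → List (Int × Int)
  | [], ys => ys.map (fun y => (y, (0 : Int)))
  | x :: xs, [] => (x :: xs).map (fun x => (x, (1 : Int)))
  | x :: xs, y :: ys =>
      if x < y then (x, 1) :: pvMrg xs (y :: ys) else (y, 0) :: pvMrg (x :: xs) ys
  termination_by xs ys => xs.length + ys.length
  decreasing_by all_goals (simp; try omega)

-- the bracket-projection both canonical forms are rendered through
def pvProj (e : Int × Int) : String := if e.2 ≠ 0 then "(" else ")"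

theorem pvTailClose_eq (ig : Int) (ys : List Int) :
    pvTailClose ig ys = ((ys.filter (fun p => p ≠ ig)).map (fun y => ((y, (0 : Int)) : Int × Int))).map pvProj := by
  induction ys with
  | nil => rfl
  | cons y ys ih =>
    by_cases h : ig = y
    · subst h; simp [pvTailClose, ih]
    · have h' : y ≠ ig := fun e => h e.symm
      simp [pvTailClose, h, h', ih, pvProj]

theorem pvTailOpen_eq (ig : Int) (xs : List Int) :
    pvTailOpen ig xs = ((xs.filter (fun p => p ≠ ig)).map (fun x => ((x, (1 : Int)) : Int × Int))).map pvProj := by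
  induction xs with
  | nil => rfl
  | cons x xs ih =>
    by_cases h : ig = x
    · subst h; simp [pvTailOpen, ih]
    · have h' : x ≠ ig := fun e => h e.symm
      simp [pvTailOpen, h, h', ih, pvProj]

-- A's three loops are the event merge of the two ignore-filtered lists, projected to brackets
theorem pvMergeA_eq (ig : Int) (xs ys : List Int) :
    pvMergeA ig xs ys
      = (pvMrg (xs.filter (fun p => p ≠ ig)) (ys.filter (fun p => p ≠ ig))).map pvProj := by
  induction xs, ys using pvMergeA.induct ig with
  | case1 ys => simp [pvMergeA, pvMrg, pvTailClose_eq]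
  | case2 x xs =>
    have h0 : pvMergeA ig (x :: xs) [] = pvTailOpen ig (x :: xs) := by simp [pvMergeA]
    rw [h0, pvTailOpen_eq]
    cases h : List.filter (fun p => decide (p ≠ ig)) (x :: xs) <;> simp [pvMrg]
  | case3 xs y ys ih =>
    simp [pvMergeA, List.filter_cons, ih]
  | case4 x xs ys hx ih =>
    have hx' : x ≠ ig := fun e => hx e.symm
    simp [pvMergeA, hx, hx', ih]
  | case5 x xs y ys hx hy hlt ih =>
    have hx' : x ≠ ig := fun e => hx e.symm
    have hy' : y ≠ ig := fun e => hy e.symm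
    simp [pvMergeA, hx, hy, hx', hy', hlt, pvMrg, ih, pvProj]
  | case6 x xs y ys hx hy hlt ih =>
    have hx' : x ≠ ig := fun e => hx e.symm
    have hy' : y ≠ ig := fun e => hy e.symm
    simp [pvMergeA, hx, hy, hx', hy', hlt, pvMrg, ih, pvProj]

theorem pvCloseMap (t : List Int) :
    t.map (pvProj ∘ fun y => ((y, (0 : Int)) : Int × Int)) = List.replicate t.length ")" := by
  induction t with
  | nil => rfl
  | cons y ys ih => simp [pvProj, ih, List.replicate_succ]

-- one driver step: flushing the closes ≤ x and emitting '(' is the merge's head segment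
theorem pvFlushB_mrg (x : Int) (fx : List Int) (g : List Int) :
    (pvMrg (x :: fx) g).map pvProj
      = (pvFlushB x g).2 ++ "(" :: (pvMrg fx (pvFlushB x g).1).map pvProj := by
  induction g with
  | nil => cases fx <;> simp [pvMrg, pvFlushB, pvProj]
  | cons y ys ih =>
    by_cases h : y ≤ x
    · have hlt : ¬ x < y := not_lt.mpr h
      simp [pvMrg, pvFlushB, h, hlt, pvProj, ih]
    · have hlt : x < y := lt_of_not_ge h
      simp [pvMrg, pvFlushB, h, hlt, pvProj]

-- B's driver loop, from any state, appends the merge of the remaining opens with the rest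
theorem pvDriveB_mrg (ig : Int) (opens : List Int) :
    ∀ (rest : List Int) (seq : List String),
      (opens.foldl (pvDriveB ig) (rest, seq)).2
          ++ List.replicate (opens.foldl (pvDriveB ig) (rest, seq)).1.length ")"
        = seq ++ (pvMrg (opens.filter (fun p => p ≠ ig)) rest).map pvProj := by
  induction opens with
  | nil =>
    intro rest seq
    cases rest <;> simp [pvMrg, pvProj, List.replicate_succ, pvCloseMap]
  | cons x opens ih =>
    intro rest seq
    by_cases h : x = ig
    · simp [List.foldl_cons, pvDriveB, h, ih]
    · simp only [List.foldl_cons, pvDriveB, h, if_false, List.filter_cons,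
        decide_eq_true_eq, ih]
      simp [h, pvFlushB_mrg x _ rest]

-- ===== VERDICT (by name: the statement is the Claim_ definition above) =====
theorem make_seq_spec : Claim_equal_make_seq := by
  intro br ignore _hdom _hpre
  unfold Spec_make_seq make_seq make_seq_alt
  rw [pvMergeA_eq]
  exact (pvDriveB_mrg ignore _ _ []).symm
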